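-- pv_equiv track=rewrite | github.com/lennylv/DeepNup | Data_encoded.py | ENAC
-- ===== SOURCE A (Python) =====
-- def ENAC(sequence, w):
--     ENAC_encoded = []
--     for i in range(len(sequence)):
--         f = []
--         f.append(sequence[i: i + w].count("A"))
--         f.append(sequence[i: i + w].count("C"))
--         f.append(sequence[i: i + w].count("G"))
--         f.append(sequence[i: i + w].count("T"))
--         ENAC_encoded.append(f)
--     return ENAC_encoded
-- ===== SOURCE B (Python) =====
-- def _prefix(seq, ch):
--     counts = [0]
--     c = 0
--     for x in seq:
--         if x == ch:
--             c += 1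
--         counts.append(c)
--     return counts
--
-- def ENAC(sequence, w):
--     n = len(sequence)
--     pa = _prefix(sequence, "A")
--     pc = _prefix(sequence, "C")
--     pg = _prefix(sequence, "G")
--     pt = _prefix(sequence, "T")
--     out = []
--     for i in range(n):
--         j = max(i, min(i + w, n))
--         out.append([pa[j] - pa[i], pc[j] - pc[i], pg[j] - pg[i], pt[j] - pt[i]])
--     return out
-- ===== Notes on version B (the rewrite author's own statement) =====
-- stated objective: faster
-- what changed: Replaces A's per-position slicing and substring-counting of each window (re-scanning up to w characters four times per position) by per-base prefix-count arrays built in one pass, so each window row is four O(1) prefix differences.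
-- intended difference: For negative window width w with len(sequence)+w>0 and an A/C/G/T among the characters every wrapped slice can reach, A's slice sequence[i:i+w] wraps the negative stop around and returns nonzero counts from an accidental tail window, while B treats a non-positive-width window as empty and returns all-zero rows, the intended value for a sliding-window count. — e.g. on ENAC("AA", -1): A returns [[1, 0, 0, 0], [0, 0, 0, 0]], B returns [[0, 0, 0, 0], [0, 0, 0, 0]]
import Mathlib
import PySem

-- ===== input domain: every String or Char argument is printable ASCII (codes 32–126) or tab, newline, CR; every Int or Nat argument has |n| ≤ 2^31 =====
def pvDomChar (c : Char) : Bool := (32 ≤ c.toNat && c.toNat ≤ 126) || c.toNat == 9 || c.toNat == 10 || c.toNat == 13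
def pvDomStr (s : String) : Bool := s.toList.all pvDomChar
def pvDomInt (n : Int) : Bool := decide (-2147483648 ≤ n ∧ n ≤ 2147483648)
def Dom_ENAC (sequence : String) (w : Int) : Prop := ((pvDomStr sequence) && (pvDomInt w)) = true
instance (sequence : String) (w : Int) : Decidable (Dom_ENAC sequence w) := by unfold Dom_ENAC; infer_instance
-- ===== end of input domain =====

-- B replaces A's per-position window slicing/counting by one pass of per-base prefix
-- counts with O(1) window lookups; for negative w (D_ENAC below) A's wrapped slices
-- yield accidental counts while B returns all-zero rows (empty windows).


-- ===== PORT A =====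
-- for i in range(len(sequence)): f = [sequence[i:i+w].count(base) for the four bases]; append f
def ENAC (sequence : String) (w : Int) : List (List Int) :=
  (PySem.List.pyRange 0 (PySem.Str.len sequence) 1).foldl
    (fun acc i =>
      let f : List Int :=
        [ (PySem.Chars.count (PySem.List.slice sequence.toList (some i) (some (i + w))) ['A'] : Int),
          (PySem.Chars.count (PySem.List.slice sequence.toList (some i) (some (i + w))) ['C'] : Int),
          (PySem.Chars.count (PySem.List.slice sequence.toList (some i) (some (i + w))) ['G'] : Int),
          (PySem.Chars.count (PySem.List.slice sequence.toList (some i) (some (i + w))) ['T'] : Int) ]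
      acc ++ [f]) []

-- ===== PORT B =====
-- _prefix(seq, ch): counts[k] = number of ch among the first k characters
def prefCounts (cs : List Char) (ch : Char) : List Int :=
  (cs.foldl
    (fun (st : Int × List Int) x =>
      ((if x == ch then st.1 + 1 else st.1), st.2 ++ [if x == ch then st.1 + 1 else st.1]))
    (0, [(0 : Int)])).2

def ENAC_alt (sequence : String) (w : Int) : List (List Int) :=
  let cs := sequence.toList
  let n : Int := PySem.Str.len sequence
  let pa := prefCounts cs 'A'
  let pc := prefCounts cs 'C'
  let pg := prefCounts cs 'G'
  let pt := prefCounts cs 'T'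
  (PySem.List.pyRange 0 n 1).foldl
    (fun out i =>
      let j := max i (min (i + w) n)
      out ++
        [[ PySem.List.pyGetD pa j 0 - PySem.List.pyGetD pa i 0,
           PySem.List.pyGetD pc j 0 - PySem.List.pyGetD pc i 0,
           PySem.List.pyGetD pg j 0 - PySem.List.pyGetD pg i 0,
           PySem.List.pyGetD pt j 0 - PySem.List.pyGetD pt i 0 ]]) []

-- ===== PRECONDITION & SPEC =====
-- For negative window width w with len(sequence)+w>0 and an A/C/G/T among the characters
-- the wrapped slices can reach, A's slice sequence[i:i+w] wraps the negative stop around and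
-- returns nonzero counts from an accidental tail window, while B treats a non-positive-width
-- window as empty and returns all-zero rows, the intended value for a sliding-window count.
def D_ENAC (sequence : String) (w : Int) : Prop :=
  w < 0 ∧ 0 < (sequence.toList.length : Int) + w ∧
  ((sequence.toList.take
      (if -w < (sequence.toList.length : Int) then sequence.toList.length - 1
       else sequence.toList.length)).any
    (fun c => (['A', 'C', 'G', 'T'] : List Char).contains c)) = true
instance (sequence : String) (w : Int) : Decidable (D_ENAC sequence w) := by unfold D_ENAC; infer_instance

def Spec_ENAC (sequence : String) (w : Int) (out : List (List Int)) : Prop :=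
  ¬ D_ENAC sequence w → out = ENAC_alt sequence w
instance (sequence : String) (w : Int) (out : List (List Int)) : Decidable (Spec_ENAC sequence w out) := by unfold Spec_ENAC; infer_instance

def pvDiffWitness_ENAC : String × Int := ("AA", -1)
def pvDiffWitnessOut_ENAC : (List (List Int)) × (List (List Int)) :=
  ([[1, 0, 0, 0], [0, 0, 0, 0]], [[0, 0, 0, 0], [0, 0, 0, 0]])

-- ===== CLAIM (what is proved, stated in full; the proofs are below) =====
def Claim_unchanged_ENAC : Prop := ∀ (sequence : String) (w : Int), Dom_ENAC sequence w → Spec_ENAC sequence w (ENAC sequence w)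
def Claim_changed_ENAC : Prop := Dom_ENAC (pvDiffWitness_ENAC.1) (pvDiffWitness_ENAC.2) ∧ D_ENAC (pvDiffWitness_ENAC.1) (pvDiffWitness_ENAC.2) ∧ ENAC (pvDiffWitness_ENAC.1) (pvDiffWitness_ENAC.2) = pvDiffWitnessOut_ENAC.1 ∧ ENAC_alt (pvDiffWitness_ENAC.1) (pvDiffWitness_ENAC.2) = pvDiffWitnessOut_ENAC.2 ∧ pvDiffWitnessOut_ENAC.1 ≠ pvDiffWitnessOut_ENAC.2
def Claim_exact_ENAC : Prop := ∀ (sequence : String) (w : Int), Dom_ENAC sequence w → D_ENAC sequence w → ENAC sequence w ≠ ENAC_alt sequence w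

-- ===== LEMMAS AND PROOFS =====

-- str.count with a single-character needle is the character count
lemma count_go_single (c : Char) :
    ∀ (l : List Char) (fuel acc : Nat), l.length ≤ fuel →
      PySem.Chars.count.go [c] fuel l acc = acc + l.count c := by
  intro l
  induction l with
  | nil => intro fuel acc _; cases fuel <;> simp [PySem.Chars.count.go]
  | cons h t ih =>
      intro fuel acc hf
      cases fuel with
      | zero => simp at hf
      | succ f =>
          have ht : t.length ≤ f := by simpa using hf
          by_cases hc : c = h
          · subst hc
            simp [PySem.Chars.count.go, List.isPrefixOf, ih f (acc + 1) ht]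
            omega
          · have hp : ([c].isPrefixOf (h :: t)) = false := by
              simp [List.isPrefixOf, hc]
            simp [PySem.Chars.count.go, hp, ih f acc ht, Ne.symm hc]

lemma count_single (l : List Char) (c : Char) :
    PySem.Chars.count l [c] = l.count c := by
  simp [PySem.Chars.count, count_go_single c l l.length 0 le_rfl]

-- the prefix-count fold computes (total count, counts of every prefix)
lemma prefFold_eq (ch : Char) (cs : List Char) :
    cs.foldl
      (fun (st : Int × List Int) x =>
        ((if x == ch then st.1 + 1 else st.1), st.2 ++ [if x == ch then st.1 + 1 else st.1]))
      (0, [(0 : Int)])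
    = ((cs.count ch : Int),
       (List.range (cs.length + 1)).map (fun k => ((cs.take k).count ch : Int))) := by
  induction cs using List.reverseRecOn with
  | nil => simp
  | append_singleton cs x ih =>
      rw [List.foldl_append, ih]
      have hmap : (List.range (cs.length + 1)).map
          (fun k => (((cs ++ [x]).take k).count ch : Int))
          = (List.range (cs.length + 1)).map (fun k => ((cs.take k).count ch : Int)) := by
        refine List.map_congr_left ?_
        intro k hk
        have hk' : k ≤ cs.length := Nat.lt_succ_iff.mp (List.mem_range.mp hk)
        rw [List.take_append_of_le_length hk']
      have htake : (cs ++ [x]).take (cs.length + 1) = cs ++ [x] := by simp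
      have hlen : (cs ++ [x]).length = cs.length + 1 := by simp
      refine Prod.ext ?_ ?_
      · by_cases hx : x = ch <;> simp [hx, List.count_append]
      · simp only [List.foldl_cons, List.foldl_nil, hlen]
        rw [List.range_succ (n := cs.length + 1), List.map_append, hmap, List.map_cons, List.map_nil, htake]
        by_cases hx : x = ch <;> simp [hx, List.count_append]

lemma prefCounts_eq (cs : List Char) (ch : Char) :
    prefCounts cs ch
      = (List.range (cs.length + 1)).map (fun k => ((cs.take k).count ch : Int)) := by
  unfold prefCounts
  rw [prefFold_eq]

lemma pref_lookup (cs : List Char) (ch : Char) (m : Nat) (hm : m ≤ cs.length) :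
    PySem.List.pyGetD (prefCounts cs ch) (m : Int) 0 = ((cs.take m).count ch : Int) := by
  rw [prefCounts_eq, PySem.List.pyGetD_natCast]
  exact PySem.List.getD_map_range _ _ _ _ (by omega)

-- prefix-difference identity for the window count
lemma window_count (cs : List Char) (ch : Char) (k e : Nat) (hke : k ≤ e) :
    (cs.take k).count ch + ((cs.drop k).take (e - k)).count ch = (cs.take e).count ch := by
  have he : k + (e - k) = e := by omega
  rw [← List.count_append, ← List.take_add, he]

lemma slice_shape (cs : List Char) (k : Nat) (j : Int) (hk : k < cs.length) :
    PySem.List.slice cs (some (k : Int)) (some j)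
      = (cs.drop k).take (PySem.List.clampIdx cs.length j - k) := by
  simp [PySem.List.slice, Nat.min_eq_left hk.le]

-- a single row entry agrees with the prefix difference (outside the D_ region)
lemma entry_eq (cs : List Char) (w : Int) (ch : Char) (k : Nat) (hk : k < cs.length)
    (hz : w < 0 → 0 < (cs.length : Int) + w →
      (cs.take (if -w < (cs.length : Int) then cs.length - 1 else cs.length)).count ch = 0) :
    (((cs.drop k).take (PySem.List.clampIdx cs.length ((k : Int) + w) - k)).count ch : Int)
      = PySem.List.pyGetD (prefCounts cs ch) (max (k : Int) (min ((k : Int) + w) (cs.length : Int))) 0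
        - PySem.List.pyGetD (prefCounts cs ch) (k : Int) 0 := by
  set n := cs.length with hn
  set mI := max (k : Int) (min ((k : Int) + w) (n : Int)) with hmIdef
  have h0 : (0 : Int) ≤ mI := le_trans (by positivity) (le_max_left _ _)
  set m := mI.toNat with hmdef
  have hmI : mI = (m : Int) := (Int.toNat_of_nonneg h0).symm
  have hm_le : m ≤ n := by omega
  have hkm : k ≤ m := by omega
  rw [hmI, pref_lookup cs ch m hm_le, pref_lookup cs ch k hk.le]
  have hw := window_count cs ch k m hkm
  have main : ((cs.drop k).take (PySem.List.clampIdx n ((k : Int) + w) - k)).count ch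
      = ((cs.drop k).take (m - k)).count ch := by
    by_cases hw0 : 0 ≤ w
    · have : PySem.List.clampIdx n ((k : Int) + w) = m := by
        unfold PySem.List.clampIdx; split_ifs <;> omega
      rw [this]
    · have hneg : w < 0 := by omega
      have hmk : m = k := by omega
      rw [hmk, Nat.sub_self, List.take_zero, List.count_nil]
      set e := PySem.List.clampIdx n ((k : Int) + w) with hedef
      by_cases hnw : 0 < (n : Int) + w
      · have hbz := hz hneg hnw
        have he_le : e ≤ (if -w < (n : Int) then n - 1 else n) := by
          rw [hedef]; unfold PySem.List.clampIdx; split_ifs <;> omega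
        by_cases hek : e ≤ k
        · rw [Nat.sub_eq_zero_of_le hek, List.take_zero, List.count_nil]
        · have hke : k ≤ e := by omega
          have hwe := window_count cs ch k e hke
          have h2 : (cs.take e).count ch ≤
              (cs.take (if -w < (n : Int) then n - 1 else n)).count ch := by
            have : cs.take e = (cs.take (if -w < (n : Int) then n - 1 else n)).take e := by
              rw [List.take_take, Nat.min_eq_left he_le]
            rw [this]
            exact (List.take_sublist _ _).count_le ch
          omega
      · have : e ≤ k := by
          rw [hedef]; unfold PySem.List.clampIdx; split_ifs <;> omega
        rw [Nat.sub_eq_zero_of_le this, List.take_zero, List.count_nil]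
  rw [main]
  omega

lemma main_eq (sequence : String) (w : Int)
    (hz : ∀ ch ∈ (['A', 'C', 'G', 'T'] : List Char), w < 0 → 0 < (sequence.toList.length : Int) + w →
      (sequence.toList.take
        (if -w < (sequence.toList.length : Int) then sequence.toList.length - 1
         else sequence.toList.length)).count ch = 0) :
    ENAC sequence w = ENAC_alt sequence w := by
  unfold ENAC ENAC_alt
  simp only [PySem.List.foldl_append_singleton_eq_map, List.nil_append,
    PySem.Str.len_eq, PySem.List.pyRange_one, List.map_map]
  have hn : ((sequence.toList.length : Int) - 0).toNat = sequence.toList.length := by omega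
  rw [hn]
  refine List.map_congr_left ?_
  intro k hk
  have hk' : k < sequence.toList.length := List.mem_range.mp hk
  simp only [Function.comp_apply, zero_add]
  rw [count_single, count_single, count_single, count_single]
  rw [slice_shape sequence.toList k _ hk']
  rw [entry_eq sequence.toList w 'A' k hk' (hz 'A' (by simp)),
      entry_eq sequence.toList w 'C' k hk' (hz 'C' (by simp)),
      entry_eq sequence.toList w 'G' k hk' (hz 'G' (by simp)),
      entry_eq sequence.toList w 'T' k hk' (hz 'T' (by simp))]


-- every row of B is all-zero when the window width is negative
lemma ENAC_alt_neg (sequence : String) (w : Int) (hw : w < 0) :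
    ENAC_alt sequence w
      = (List.range sequence.toList.length).map (fun _ => ([0, 0, 0, 0] : List Int)) := by
  unfold ENAC_alt
  simp only [PySem.List.foldl_append_singleton_eq_map, List.nil_append,
    PySem.Str.len_eq, PySem.List.pyRange_one, List.map_map]
  have hn : ((sequence.toList.length : Int) - 0).toNat = sequence.toList.length := by omega
  rw [hn]
  refine List.map_congr_left ?_
  intro k hk
  have hk' : k < sequence.toList.length := List.mem_range.mp hk
  have hj : max ((k : Nat) : Int) (min (((k : Nat) : Int) + w) (sequence.toList.length : Int))
      = ((k : Nat) : Int) := by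
    rw [min_eq_left (by omega), max_eq_left (by omega)]
  simp only [Function.comp_apply, zero_add, hj, sub_self]

-- A in map form, rows as clamped-slice counts
lemma ENAC_eq_map (sequence : String) (w : Int) :
    ENAC sequence w
      = (List.range sequence.toList.length).map (fun k =>
          ([ ((((sequence.toList.drop k).take (PySem.List.clampIdx sequence.toList.length ((k : Int) + w) - k)).count 'A' : Nat) : Int),
             ((((sequence.toList.drop k).take (PySem.List.clampIdx sequence.toList.length ((k : Int) + w) - k)).count 'C' : Nat) : Int),
             ((((sequence.toList.drop k).take (PySem.List.clampIdx sequence.toList.length ((k : Int) + w) - k)).count 'G' : Nat) : Int),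
             ((((sequence.toList.drop k).take (PySem.List.clampIdx sequence.toList.length ((k : Int) + w) - k)).count 'T' : Nat) : Int) ] : List Int)) := by
  unfold ENAC
  simp only [PySem.List.foldl_append_singleton_eq_map, List.nil_append,
    PySem.Str.len_eq, PySem.List.pyRange_one, List.map_map]
  have hn : ((sequence.toList.length : Int) - 0).toNat = sequence.toList.length := by omega
  rw [hn]
  refine List.map_congr_left ?_
  intro k hk
  have hk' : k < sequence.toList.length := List.mem_range.mp hk
  simp only [Function.comp_apply, zero_add]
  rw [count_single, count_single, count_single, count_single, slice_shape sequence.toList k _ hk']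

-- ===== VERDICT (by name: the statement is the Claim_ definition above) =====
theorem ENAC_spec : Claim_unchanged_ENAC := by
  intro sequence w _ hD
  refine main_eq sequence w ?_
  intro ch hch hneg hnw
  unfold D_ENAC at hD
  have hany : ((sequence.toList.take
      (if -w < (sequence.toList.length : Int) then sequence.toList.length - 1
       else sequence.toList.length)).any
      (fun c => (['A', 'C', 'G', 'T'] : List Char).contains c)) = false := by
    by_contra hb
    simp only [Bool.not_eq_false] at hb
    exact hD ⟨hneg, hnw, hb⟩
  rw [List.any_eq_false] at hany
  rw [List.count_eq_zero]
  intro hmem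
  have := hany ch hmem
  simp [hch] at this
theorem ENAC_changed : Claim_changed_ENAC := by
  unfold Claim_changed_ENAC; decide
theorem ENAC_tight : Claim_exact_ENAC := by
  intro sequence w _ hD heq
  obtain ⟨hneg, hnw, hany⟩ := hD
  set cs := sequence.toList with hcs
  set n := cs.length with hn
  rw [List.any_eq_true] at hany
  obtain ⟨ch, hchmem, hchACGT⟩ := hany
  obtain ⟨p, hp_lt, hp_eq⟩ := List.getElem_of_mem hchmem
  have hp_lt' : p < (if -w < (n : Int) then n - 1 else n) ∧ p < n := by
    rw [List.length_take] at hp_lt; omega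
  have hpch : cs[p]'hp_lt'.2 = ch := by
    rw [← hp_eq, List.getElem_take]
  have hchl : ch ∈ (['A', 'C', 'G', 'T'] : List Char) := by
    simpa using hchACGT
  -- the row index whose wrapped window contains position p
  set iI : Int := min (p : Int) (max 0 ((p : Int) + 1 - (n : Int) - w)) with hiI
  have hfacts : 0 ≤ iI ∧ iI ≤ (p : Int) ∧ (p : Int) < (n : Int) + iI + w ∧ iI + w < 0 := by
    by_cases hcase : -w < (n : Int) <;> simp only [hcase, if_true, if_false] at hp_lt' <;> omega
  set i : Nat := iI.toNat with hi
  have hiI' : iI = (i : Int) := (Int.toNat_of_nonneg hfacts.1).symm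
  have hin : i < n := by omega
  set e : Nat := PySem.List.clampIdx n ((i : Int) + w) with he
  have hpe : i ≤ p ∧ p < e ∧ e ≤ n := by
    rw [he]; unfold PySem.List.clampIdx; split_ifs <;> omega
  have hmem : ch ∈ (cs.drop i).take (e - i) := by
    have hidx : p - i < ((cs.drop i).take (e - i)).length := by
      rw [List.length_take, List.length_drop]; omega
    have : ((cs.drop i).take (e - i))[p - i]'hidx = ch := by
      rw [List.getElem_take, List.getElem_drop, ← hpch]
      congr 1; omega
    rw [← this]; exact List.getElem_mem _
  have hcount : 0 < ((cs.drop i).take (e - i)).count ch := List.count_pos_iff.mpr hmem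
  -- compare row i of the two results
  have hrow := congrArg (fun l => l[i]?) heq
  rw [ENAC_eq_map, ENAC_alt_neg sequence w hneg] at hrow
  simp only [List.getElem?_map] at hrow
  rw [List.getElem?_range hin] at hrow
  simp only [Option.map_some, Option.some.injEq] at hrow
  have h4 := hrow
  simp only [List.cons.injEq, and_true] at h4
  rw [← hcs, ← hn] at h4
  rw [he] at hcount
  have hchl' : ch = 'A' ∨ ch = 'C' ∨ ch = 'G' ∨ ch = 'T' := by simpa using hchl
  rcases hchl' with h | h | h | h <;> rw [h] at hcount <;> omega
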